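-- pv_equiv track=rewrite | github.com/ndkgit339/filledpause_prediction_group | fp_pred_group/preprocessor/my_analyze_token.py | get_ipu_dict
-- ===== SOURCE A (Python) =====
-- def latter_id(s):
--     n = int(s)
--     n += 1
--     if 0<=n<10:
--         return '000' + str(n)
--     elif 10<=n<100:
--         return '00' + str(n)
--     elif 100<=n<1000:
--         return '0' + str(n)
--     else:
--         return str(n)
--
-- def get_ipu_dict(trn_text_lines):
--
--     trn_text_lines = [l.replace(' ','').split('&')[0] for l in trn_text_lines]
--
--     ipu_textlist_dict = dict()
--
--     i = 0
--     ipuid = '0001'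
--     while i < len(trn_text_lines):
--         if trn_text_lines[i][:4] == ipuid:
--             ipu_text = []
--             i += 1
--             while i<len(trn_text_lines) and trn_text_lines[i][:4]!=latter_id(ipuid):
--                 ipu_text.append(trn_text_lines[i])
--                 i += 1
--             ipu_textlist_dict[ipuid] = ipu_text
--
--             ipuid = latter_id(ipuid)
--         else:
--             i += 1
--
--     return ipu_textlist_dict
-- ===== SOURCE B (Python) =====
-- def latter_id(s):
--     n = int(s)
--     n += 1
--     if 0<=n<10:
--         return '000' + str(n)
--     elif 10<=n<100:
--         return '00' + str(n)
--     elif 100<=n<1000: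
--         return '0' + str(n)
--     else:
--         return str(n)
--
-- def get_ipu_dict(trn_text_lines):
--     lines = [l.replace(' ','').split('&')[0] for l in trn_text_lines]
--     prefixes = [l[:4] for l in lines]
--     # Stage 1: locate the marker positions of the sequential ids by repeated
--     # index searches (first '0001', then the first '0002' after it, ...).
--     bounds = []            # list of (ipuid, marker position)
--     ipuid = '0001'
--     start = 0
--     while True:
--         try:
--             i = prefixes.index(ipuid, start)
--         except ValueError:
--             break
--         bounds.append((ipuid, i))
--         ipuid = latter_id(ipuid)
--         start = i + 1
--     # Stage 2: each group is the slice between its marker and the next one.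
--     ends = [i for _, i in bounds[1:]] + [len(lines)]
--     result = {}
--     for (k, i), end in zip(bounds, ends):
--         result[k] = lines[i+1:end]
--     return result
-- ===== Notes on version B (the rewrite author's own statement) =====
-- stated objective: alternative
-- what changed: Replaces A's single pass with nested while-loops collecting lines one by one by a staged algorithm: first locate all sequential-id marker positions via repeated list.index searches on a precomputed prefix list, then build each group as a slice between consecutive markers.
import Mathlib
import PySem

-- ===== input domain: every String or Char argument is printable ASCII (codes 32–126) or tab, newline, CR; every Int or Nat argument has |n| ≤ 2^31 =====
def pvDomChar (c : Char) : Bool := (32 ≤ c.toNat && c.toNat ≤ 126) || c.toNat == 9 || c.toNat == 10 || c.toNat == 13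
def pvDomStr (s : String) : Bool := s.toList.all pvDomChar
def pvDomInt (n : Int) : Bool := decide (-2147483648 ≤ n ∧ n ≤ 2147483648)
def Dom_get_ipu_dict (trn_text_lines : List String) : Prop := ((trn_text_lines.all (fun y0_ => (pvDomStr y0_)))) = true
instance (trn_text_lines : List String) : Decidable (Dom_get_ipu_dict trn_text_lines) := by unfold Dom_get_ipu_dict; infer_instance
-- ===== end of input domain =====

-- B replaces A's nested while-loops (one pass collecting lines one by one) by a
-- staged algorithm: locate all marker positions by repeated index searches on a
-- prefix list, then build each group as a slice between consecutive markers
-- (objective: alternative; same cost).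

-- ===== PORT A =====

-- shared helper from the Python module: latter_id(s) (Python raises ValueError on a
-- non-int string; both programs only ever call it on ipuid values like '0001', which
-- parse, so the 'none' branch is unreachable in the ports)
def latter_id (s : String) : String :=
  match PySem.Int.ofStr? s with
  | none => ""
  | some n0 =>
    let n := n0 + 1
    if 0 ≤ n ∧ n < 10 then "000" ++ PySem.Int.toStr n
    else if 10 ≤ n ∧ n < 100 then "00" ++ PySem.Int.toStr n
    else if 100 ≤ n ∧ n < 1000 then "0" ++ PySem.Int.toStr n
    else PySem.Int.toStr n

-- l.replace(' ','').split('&')[0]  (split with nonempty sep is never empty, so [0] = head)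
def pvPrep (l : String) : String :=
  (((PySem.Str.split? (PySem.Str.replace l " " "") "&").getD []).headD "")

-- l[:4]
def pvPrefix4 (l : String) : String := PySem.Str.slice l none (some 4)

-- A's inner while: append lines until one starting with `stop`; returns (ipu_text, rest)
def pvCollect (stop : String) : List String → List String × List String
  | [] => ([], [])
  | l :: rest =>
    if pvPrefix4 l = stop then ([], l :: rest)
    else ((pvCollect stop rest).1.cons l, (pvCollect stop rest).2)

theorem pvCollect_len (stop : String) (xs : List String) :
    (pvCollect stop xs).2.length ≤ xs.length := by
  induction xs with
  | nil => simp [pvCollect]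
  | cons l rest ih =>
    by_cases h : pvPrefix4 l = stop <;> simp [pvCollect, h] <;> omega

-- A's outer while over the remaining lines
def pvOuter (ipuid : String) (d : PySem.Dict String (List String)) :
    List String → PySem.Dict String (List String)
  | [] => d
  | l :: rest =>
    if pvPrefix4 l = ipuid then
      pvOuter (latter_id ipuid)
        (d.insert ipuid (pvCollect (latter_id ipuid) rest).1)
        (pvCollect (latter_id ipuid) rest).2
    else pvOuter ipuid d rest
termination_by xs => xs.length
decreasing_by
  · exact Nat.lt_succ_of_le (pvCollect_len _ rest)
  · simp

def get_ipu_dict (trn_text_lines : List String) : List (String × List String) :=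
  (pvOuter "0001" PySem.Dict.empty (trn_text_lines.map pvPrep)).items

-- ===== PORT B =====

-- prefixes.index(ipuid, start)  (list.index with a nonnegative start; none = ValueError)
def pyIndexFrom (xs : List String) (v : String) (start : Nat) : Option Nat :=
  (PySem.List.index? (xs.drop start) v).map (· + start)

theorem pyIndexFrom_bounds {xs : List String} {v : String} {start i : Nat}
    (h : pyIndexFrom xs v start = some i) : start ≤ i ∧ i < xs.length := by
  unfold pyIndexFrom at h
  rw [Option.map_eq_some_iff] at h
  obtain ⟨j, hj, hji⟩ := h
  obtain ⟨hk, -, -⟩ := PySem.List.getElem_of_index?_eq_some hj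
  simp only [List.length_drop] at hk
  omega

-- B's stage-1 while loop: the marker positions of the successive ids
def pvBounds (prefixes : List String) (ipuid : String) (start : Nat) :
    List (String × Nat) :=
  match h : pyIndexFrom prefixes ipuid start with
  | none => []
  | some i => (ipuid, i) :: pvBounds prefixes (latter_id ipuid) (i + 1)
termination_by prefixes.length + 1 - start
decreasing_by
  have := pyIndexFrom_bounds h
  omega

def get_ipu_dict_alt (trn_text_lines : List String) : List (String × List String) :=
  let lines := trn_text_lines.map pvPrep
  let prefixes := lines.map pvPrefix4
  let bounds := pvBounds prefixes "0001" 0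
  -- ends = [i for _, i in bounds[1:]] + [len(lines)]
  let ends : List Nat := ((PySem.List.slice bounds (some 1) none).map Prod.snd) ++ [lines.length]
  -- for (k, i), end in zip(bounds, ends): result[k] = lines[i+1:end]
  ((bounds.zip ends).foldl
      (fun d p =>
        d.insert p.1.1 (PySem.List.slice lines (some ((p.1.2 : Int) + 1)) (some (p.2 : Int))))
      PySem.Dict.empty).items

-- ===== PRECONDITION & SPEC =====
def Spec_get_ipu_dict (trn_text_lines : List String) (out : List (String × List String)) : Prop := out = get_ipu_dict_alt trn_text_lines
instance (trn_text_lines : List String) (out : List (String × List String)) : Decidable (Spec_get_ipu_dict trn_text_lines out) := by unfold Spec_get_ipu_dict; infer_instance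

-- ===== CLAIM =====
def Claim_equal_get_ipu_dict : Prop := ∀ (trn_text_lines : List String), Dom_get_ipu_dict trn_text_lines → Spec_get_ipu_dict trn_text_lines (get_ipu_dict trn_text_lines)

-- ===== LEMMAS AND PROOFS =====

-- recursive form of B's stage 2 (proved equal to the zip/fold in get_ipu_dict_alt)
def pvStage2 (lines : List String) (d : PySem.Dict String (List String)) :
    List (String × Nat) → PySem.Dict String (List String)
  | [] => d
  | (k, i) :: rest =>
    pvStage2 lines
      (d.insert k ((lines.drop (i + 1)).take
        ((match rest with | [] => lines.length | (_, i2) :: _ => i2) - (i + 1))))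
      rest

theorem pvStage2_eq_zipfold (lines : List String) (bounds : List (String × Nat)) :
    ∀ d, ((bounds.zip (((PySem.List.slice bounds (some 1) none).map Prod.snd) ++ [lines.length])).foldl
      (fun d p =>
        d.insert p.1.1 (PySem.List.slice lines (some ((p.1.2 : Int) + 1)) (some (p.2 : Int))))
      d) = pvStage2 lines d bounds := by
  induction bounds with
  | nil => intro d; simp [pvStage2]
  | cons hd tl ih =>
    intro d
    obtain ⟨k, i⟩ := hd
    rw [PySem.List.slice_from_one] at *
    cases tl with
    | nil =>
      simp only [List.tail_cons, List.map_nil, List.nil_append, List.zip_cons_cons,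
        List.zip_nil_right, List.foldl_cons, List.foldl_nil, pvStage2]
      have : ((i : Int) + 1) = ((i + 1 : Nat) : Int) := by push_cast; ring
      rw [this, PySem.List.slice_natCast]
    | cons hd2 tl2 =>
      obtain ⟨k2, i2⟩ := hd2
      simp only [List.tail_cons, List.map_cons, List.cons_append, List.zip_cons_cons,
        List.foldl_cons, pvStage2]
      have : ((i : Int) + 1) = ((i + 1 : Nat) : Int) := by push_cast; ring
      rw [this, PySem.List.slice_natCast]
      exact ih _

-- pvOuter skips lines whose prefix is not the current id
theorem pvOuter_skip (ipuid : String) (d : PySem.Dict String (List String))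
    (pre ys : List String) (hpre : ∀ l ∈ pre, pvPrefix4 l ≠ ipuid) :
    pvOuter ipuid d (pre ++ ys) = pvOuter ipuid d ys := by
  induction pre with
  | nil => rfl
  | cons p rest ih =>
    have hp : pvPrefix4 p ≠ ipuid := hpre p (by simp)
    rw [List.cons_append, pvOuter, if_neg hp]
    exact ih (fun l hl => hpre l (by simp [hl]))

-- pvCollect when the stop prefix never occurs
theorem pvCollect_all (stop : String) (xs : List String)
    (h : ∀ l ∈ xs, pvPrefix4 l ≠ stop) : pvCollect stop xs = (xs, []) := by
  induction xs with
  | nil => rfl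
  | cons l rest ih =>
    have hl : pvPrefix4 l ≠ stop := h l (by simp)
    simp only [pvCollect, if_neg hl, ih (fun m hm => h m (by simp [hm]))]

-- pvCollect up to the first line whose prefix is the stop id
theorem pvCollect_split (stop : String) (pre : List String) (m : String) (suf : List String)
    (hpre : ∀ l ∈ pre, pvPrefix4 l ≠ stop) (hm : pvPrefix4 m = stop) :
    pvCollect stop (pre ++ m :: suf) = (pre, m :: suf) := by
  induction pre with
  | nil => simp [pvCollect, hm]
  | cons p rest ih =>
    have hp : pvPrefix4 p ≠ stop := hpre p (by simp)
    simp only [List.cons_append, pvCollect, if_neg hp,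
      ih (fun l hl => hpre l (by simp [hl]))]

-- a failed index search means the value's preimage never occurs in the suffix
theorem pyIndexFrom_none {lines : List String} {v : String} {s : Nat}
    (h : pyIndexFrom (lines.map pvPrefix4) v s = none) :
    ∀ l ∈ lines.drop s, pvPrefix4 l ≠ v := by
  unfold pyIndexFrom at h
  rw [Option.map_eq_none_iff, PySem.List.index?_eq_none_iff, ← List.map_drop] at h
  intro l hl hv
  exact h (hv ▸ List.mem_map_of_mem hl)

-- a successful index search decomposes the suffix of lines around the first match
theorem pyIndexFrom_some {lines : List String} {v : String} {s i : Nat}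
    (h : pyIndexFrom (lines.map pvPrefix4) v s = some i) :
    ∃ pre m suf, lines.drop s = pre ++ m :: suf ∧ pre.length = i - s ∧
      (∀ l ∈ pre, pvPrefix4 l ≠ v) ∧ pvPrefix4 m = v := by
  unfold pyIndexFrom at h
  rw [Option.map_eq_some_iff] at h
  obtain ⟨j, hj, hji⟩ := h
  rw [PySem.List.index?_eq_some_iff, ← List.map_drop] at hj
  obtain ⟨preP, sufP, heq, hlen, hnm⟩ := hj
  rw [List.map_eq_append_iff] at heq
  obtain ⟨pre, rest, hsplit, hmp, hmr⟩ := heq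
  cases rest with
  | nil => simp at hmr
  | cons m suf =>
    refine ⟨pre, m, suf, hsplit, ?_, ?_, ?_⟩
    · have : pre.length = j := by rw [← hlen, ← hmp, List.length_map]
      omega
    · intro l hl hv
      exact hnm (hv ▸ (hmp ▸ List.mem_map_of_mem hl))
    · simpa using congrArg (fun t => t.headD "") hmr

-- the marker line itself is the first match from its own position
theorem pyIndexFrom_self {lines : List String} {v : String} {i : Nat}
    (hi : i < lines.length) (hm : pvPrefix4 lines[i] = v) :
    pyIndexFrom (lines.map pvPrefix4) v i = some i := by
  unfold pyIndexFrom
  rw [← List.map_drop]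
  have hdrop : lines.drop i = lines[i] :: lines.drop (i + 1) :=
    List.drop_eq_getElem_cons hi
  rw [hdrop, List.map_cons, hm, PySem.List.index?_cons_self]
  simp

-- one-step equation for pvBounds (unfolds the dependent match)
theorem pvBounds_eq (prefixes : List String) (ipuid : String) (start : Nat) :
    pvBounds prefixes ipuid start
      = match pyIndexFrom prefixes ipuid start with
        | none => []
        | some i => (ipuid, i) :: pvBounds prefixes (latter_id ipuid) (i + 1) := by
  rw [pvBounds.eq_def]
  cases h : pyIndexFrom prefixes ipuid start <;> simp [h]

-- Main invariant: A's outer loop on the suffix from `start` equals B's stage 2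
-- applied to the bounds that B's stage 1 computes from `start`.
theorem pv_main (lines : List String) (start : Nat) (ipuid : String)
    (d : PySem.Dict String (List String)) :
    pvOuter ipuid d (lines.drop start)
      = pvStage2 lines d (pvBounds (lines.map pvPrefix4) ipuid start) := by
  cases hfind : pyIndexFrom (lines.map pvPrefix4) ipuid start with
  | none =>
    rw [pvBounds_eq, hfind]
    have h := pyIndexFrom_none hfind
    calc pvOuter ipuid d (lines.drop start)
        = pvOuter ipuid d (lines.drop start ++ []) := by rw [List.append_nil]
      _ = pvOuter ipuid d [] := pvOuter_skip ipuid d _ [] h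
      _ = pvStage2 lines d [] := by rw [pvOuter]; rw [pvStage2]
  | some i =>
    rw [pvBounds_eq, hfind]
    show pvOuter ipuid d (lines.drop start)
        = pvStage2 lines d
            ((ipuid, i) :: pvBounds (lines.map pvPrefix4) (latter_id ipuid) (i + 1))
    obtain ⟨hsi, hil⟩ := pyIndexFrom_bounds hfind
    obtain ⟨pre, m, suf, hsplit, hplen, hpre, hm⟩ := pyIndexFrom_some hfind
    have hil' : i < lines.length := by simpa using hil
    have hsuf : suf = lines.drop (i + 1) := by
      have h1 : ((lines.drop start).drop (pre.length + 1)) = suf := by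
        rw [hsplit, ← List.drop_drop, List.drop_left, List.drop_one, List.tail_cons]
      rw [← h1, List.drop_drop, hplen]
      congr 1
      omega
    have key : pvOuter ipuid d (lines.drop start)
        = pvOuter (latter_id ipuid)
            (d.insert ipuid (pvCollect (latter_id ipuid) suf).1)
            (pvCollect (latter_id ipuid) suf).2 := by
      rw [hsplit, pvOuter_skip ipuid d pre (m :: suf) hpre, pvOuter, if_pos hm]
    cases hfind2 : pyIndexFrom (lines.map pvPrefix4) (latter_id ipuid) (i + 1) with
    | none =>
      have hnone := pyIndexFrom_none hfind2
      have hcoll : pvCollect (latter_id ipuid) suf = (suf, []) :=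
        pvCollect_all _ _ (hsuf ▸ hnone)
      rw [key, hcoll, pvBounds_eq, hfind2]
      show pvOuter (latter_id ipuid) (d.insert ipuid suf) []
          = pvStage2 lines d [(ipuid, i)]
      rw [pvOuter]
      simp only [pvStage2]
      rw [List.take_of_length_le (by simp), hsuf]
    | some i2 =>
      obtain ⟨hsi2, hil2⟩ := pyIndexFrom_bounds hfind2
      obtain ⟨pre2, m2, suf2, hsplit2, hplen2, hpre2, hm2⟩ := pyIndexFrom_some hfind2
      have hil2' : i2 < lines.length := by simpa using hil2
      have hsufsplit : suf = pre2 ++ m2 :: suf2 := hsuf ▸ hsplit2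
      have hcoll : pvCollect (latter_id ipuid) suf = (pre2, m2 :: suf2) := by
        rw [hsufsplit]
        exact pvCollect_split _ _ _ _ hpre2 hm2
      have hdropi2 : m2 :: suf2 = lines.drop i2 := by
        have h1 : ((lines.drop (i + 1)).drop pre2.length) = m2 :: suf2 := by
          rw [hsplit2, List.drop_left]
        rw [← h1, List.drop_drop, hplen2]
        congr 1
        omega
      have hpre2take : pre2 = (lines.drop (i + 1)).take (i2 - (i + 1)) := by
        rw [← hplen2, hsplit2, List.take_left]
      have hm2get : pvPrefix4 (lines[i2]'hil2') = latter_id ipuid := by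
        have hdg := List.drop_eq_getElem_cons hil2'
        rw [← hdropi2] at hdg
        injection hdg with h1 h2
        rw [← h1]
        exact hm2
      have hself : pyIndexFrom (lines.map pvPrefix4) (latter_id ipuid) i2 = some i2 :=
        pyIndexFrom_self hil2' hm2get
      have hIH := pv_main lines i2 (latter_id ipuid) (d.insert ipuid pre2)
      rw [key, hcoll]
      show pvOuter (latter_id ipuid) (d.insert ipuid pre2) (m2 :: suf2) = _
      rw [hdropi2, hIH, pvBounds_eq, hself, pvBounds_eq, hfind2]
      show pvStage2 lines (d.insert ipuid pre2)
            ((latter_id ipuid, i2)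
              :: pvBounds (lines.map pvPrefix4) (latter_id (latter_id ipuid)) (i2 + 1))
          = pvStage2 lines d
            ((ipuid, i) :: (latter_id ipuid, i2)
              :: pvBounds (lines.map pvPrefix4) (latter_id (latter_id ipuid)) (i2 + 1))
      simp only [pvStage2]
      rw [hpre2take]
termination_by lines.length + 1 - start
decreasing_by omega

-- ===== VERDICT =====
theorem get_ipu_dict_spec : Claim_equal_get_ipu_dict := by
  intro xs _
  unfold Spec_get_ipu_dict get_ipu_dict
  simp only [get_ipu_dict_alt]
  rw [pvStage2_eq_zipfold]
  have h := pv_main (xs.map pvPrep) 0 "0001" PySem.Dict.empty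
  rw [List.drop_zero] at h
  rw [h]
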